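-- pv_equiv track=rewrite | github.com/kwakrhkr59/Explainable-WF | preprocessing/extractors.py | get_burst
-- ===== SOURCE A (Python) =====
-- def get_burst(traces):
--     result = []
--     for trace in traces:
--         first = True
--         feature = []
--         for t, s in trace:
--             dir = int(s/abs(s))
--             if first:
--                 direction = dir
--                 burst = dir
--                 first = False
--             elif dir == 0:
--                 break
--             elif dir == direction:
--                 burst += dir
--             else:
--                 feature.append(burst)
--                 burst = dir
--                 direction *= -1
--         result.append(feature)
--     return result
-- ===== SOURCE B (Python) =====
-- def get_burst(traces):
--     # Two-phase: run-length-encode the direction signs, then multiply out,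
--     # dropping the final run (A never emits its last burst).
--     result = []
--     for trace in traces:
--         dirs = [int(s / abs(s)) for t, s in trace]
--         runs = []
--         for d in dirs:
--             if runs and runs[-1][0] == d:
--                 runs[-1][1] += 1
--             else:
--                 runs.append([d, 1])
--         result.append([d * n for d, n in runs[:-1]])
--     return result
-- ===== Notes on version B (the rewrite author's own statement) =====
-- stated objective: alternative
-- what changed: Replaces A's inline state machine (first flag, burst accumulator, direction flipping) with a two-phase pass: run-length-encode the sign sequence, then map each run to d*count and slice off the last run.
import Mathlib
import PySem

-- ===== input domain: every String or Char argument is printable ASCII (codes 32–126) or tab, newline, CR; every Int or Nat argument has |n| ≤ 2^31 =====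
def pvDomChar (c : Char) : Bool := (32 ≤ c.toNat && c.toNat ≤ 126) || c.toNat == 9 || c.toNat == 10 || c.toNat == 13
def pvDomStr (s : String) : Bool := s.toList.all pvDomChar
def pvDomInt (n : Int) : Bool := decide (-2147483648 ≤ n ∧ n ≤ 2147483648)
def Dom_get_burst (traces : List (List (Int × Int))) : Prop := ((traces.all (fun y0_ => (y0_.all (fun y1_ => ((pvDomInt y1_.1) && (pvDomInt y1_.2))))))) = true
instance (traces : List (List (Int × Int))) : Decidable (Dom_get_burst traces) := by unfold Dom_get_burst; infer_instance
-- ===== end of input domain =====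

-- B replaces A's inline state machine with run-length-encode-then-map; return values only, no mutation.

-- ===== PORT A =====
-- int(s/abs(s)) for s ≠ 0 is the sign of s; for s = 0 Python raises ZeroDivisionError
-- (excluded by Pre_get_burst), here we return 0 (the `dir == 0` break branch below is then taken;
-- nothing is claimed outside Pre_).
def pySign (s : Int) : Int := if 0 < s then 1 else if s < 0 then -1 else 0

-- the inner `for t, s in trace` loop with its state (first, feature, burst, direction)
def loopA : List (Int × Int) → Bool → List Int → Int → Int → List Int
  | [], _, feature, _, _ => feature
  | (_, s) :: rest, first, feature, burst, direction =>
    let dir := pySign s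
    if first then loopA rest false feature dir dir
    else if dir = 0 then feature                                   -- break
    else if dir = direction then loopA rest false feature (burst + dir) direction
    else loopA rest false (feature ++ [burst]) dir (-direction)    -- direction *= -1

def get_burst (traces : List (List (Int × Int))) : List (List Int) :=
  traces.foldl (fun result trace => result ++ [loopA trace true [] 0 0]) []

-- ===== PORT B =====
-- `if runs and runs[-1][0] == d: runs[-1][1] += 1 else: runs.append([d, 1])`
def stepB (runs : List (Int × Int)) (d : Int) : List (Int × Int) :=
  match runs.getLast? with
  | some (d', n) => if d' = d then runs.dropLast ++ [(d, n + 1)] else runs ++ [(d, 1)]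
  | none => runs ++ [(d, 1)]

def burstOfTraceB (trace : List (Int × Int)) : List Int :=
  let dirs := trace.map (fun p => pySign p.2)
  let runs := dirs.foldl stepB []
  ((runs.dropLast).map (fun r => r.1 * r.2))          -- [d * n for d, n in runs[:-1]]

def get_burst_alt (traces : List (List (Int × Int))) : List (List Int) :=
  traces.map burstOfTraceB

-- ===== PRECONDITION & SPEC =====
-- Pre_ excludes exactly the inputs where A raises: `int(s/abs(s))` is a ZeroDivisionError when s = 0.
def Pre_get_burst (traces : List (List (Int × Int))) : Prop :=
  ∀ trace ∈ traces, ∀ p ∈ trace, p.2 ≠ 0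
instance (traces : List (List (Int × Int))) : Decidable (Pre_get_burst traces) := by
  unfold Pre_get_burst; infer_instance

def pvWitness_get_burst : (List (List (Int × Int))) :=
  [[(0, 3), (1, 2), (2, -1), (3, -4), (4, 5)], []]

def Spec_get_burst (traces : List (List (Int × Int))) (out : List (List Int)) : Prop := out = get_burst_alt traces
instance (traces : List (List (Int × Int))) (out : List (List Int)) : Decidable (Spec_get_burst traces out) := by unfold Spec_get_burst; infer_instance

-- ===== CLAIM (what is proved, stated in full; the proofs are below) =====
def Claim_equal_get_burst : Prop := ∀ (traces : List (List (Int × Int))), Dom_get_burst traces → Pre_get_burst traces → Spec_get_burst traces (get_burst traces)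

-- ===== LEMMAS AND PROOFS =====

-- forward run-length encoding with a pending run (d, k); closed form of B's foldl
def runsCont (d : Int) (k : Int) : List Int → List (Int × Int)
  | [] => [(d, k)]
  | x :: xs => if x = d then runsCont d (k + 1) xs else (d, k) :: runsCont x 1 xs

theorem runsCont_ne_nil (xs : List Int) (d k : Int) : runsCont d k xs ≠ [] := by
  induction xs generalizing d k with
  | nil => simp [runsCont]
  | cons x xs ih =>
    simp only [runsCont]
    split
    · exact ih _ _
    · simp

theorem foldl_stepB_runsCont (xs : List Int) (acc : List (Int × Int)) (d k : Int) :
    xs.foldl stepB (acc ++ [(d, k)]) = acc ++ runsCont d k xs := by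
  induction xs generalizing acc d k with
  | nil => simp [runsCont]
  | cons x xs ih =>
    simp only [List.foldl_cons, runsCont]
    by_cases h : x = d
    · subst h
      have hs : stepB (acc ++ [(x, k)]) x = acc ++ [(x, k + 1)] := by
        simp [stepB]
      rw [hs, ih]
      simp
    · have hs : stepB (acc ++ [(d, k)]) x = (acc ++ [(d, k)]) ++ [(x, 1)] := by
        simp [stepB, Ne.symm h]
      rw [hs]
      rw [show (acc ++ [(d, k)]) ++ [(x, 1)] = (acc ++ [(d, k)]) ++ [(x, 1)] from rfl, ih]
      simp [h]

theorem pySign_pm (s : Int) (h : s ≠ 0) : pySign s = 1 ∨ pySign s = -1 := by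
  unfold pySign
  rcases lt_trichotomy s 0 with h1 | h1 | h1
  · right; simp [h1, not_lt.mpr (le_of_lt h1)]
  · exact absurd h1 h
  · left; simp [h1]

-- main bridge: A's inner loop in its running state (burst = dir * k) against the pending-run encoding
theorem loopA_runsCont (rest : List (Int × Int)) (feature : List Int) (dir k : Int)
    (hrest : ∀ p ∈ rest, p.2 ≠ 0) (hdir : dir = 1 ∨ dir = -1) :
    loopA rest false feature (dir * k) dir
      = feature ++ (((runsCont dir k (rest.map (fun p => pySign p.2))).dropLast).map (fun r => r.1 * r.2)) := by
  induction rest generalizing feature dir k with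
  | nil => simp [loopA, runsCont]
  | cons p rest ih =>
    obtain ⟨t, s⟩ := p
    have hs : s ≠ 0 := hrest (t, s) (by simp)
    have hrest' : ∀ q ∈ rest, q.2 ≠ 0 := fun q hq => hrest q (by simp [hq])
    have hx : pySign s = 1 ∨ pySign s = -1 := pySign_pm s hs
    have hd0 : dir ≠ 0 := by rcases hdir with h | h <;> simp [h]
    by_cases heq : pySign s = dir
    · have h1 : loopA ((t, s) :: rest) false feature (dir * k) dir
          = loopA rest false feature (dir * k + dir) dir := by
        simp [loopA, hd0, heq]
      have h2 : dir * k + dir = dir * (k + 1) := by ring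
      have h3 : runsCont dir k (((t, s) :: rest).map (fun p => pySign p.2))
          = runsCont dir (k + 1) (rest.map (fun p => pySign p.2)) := by
        simp [runsCont, heq]
      rw [h1, h2, h3, ih feature dir (k + 1) hrest' hdir]
    · have hneg : pySign s = -dir := by
        rcases hx with h | h <;> rcases hdir with h2 | h2 <;> omega
      have hdir' : (-dir = 1 ∨ -dir = -1) := by rcases hdir with h | h <;> simp [h]
      have hne : ¬ (-dir = dir) := by rcases hdir with h | h <;> simp [h]
      have h1 : loopA ((t, s) :: rest) false feature (dir * k) dir
          = loopA rest false (feature ++ [dir * k]) (-dir) (-dir) := by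
        simp [loopA, hd0, hneg, hne]
      have hbr := ih (feature ++ [dir * k]) (-dir) 1 hrest' hdir'
      rw [show (-dir) * 1 = -dir from by ring] at hbr
      have h3 : runsCont dir k (((t, s) :: rest).map (fun p => pySign p.2))
          = (dir, k) :: runsCont (-dir) 1 (rest.map (fun p => pySign p.2)) := by
        simp [runsCont, hneg, hne]
      rw [h1, hbr, h3, List.dropLast_cons_of_ne_nil (runsCont_ne_nil _ _ _)]
      simp

theorem trace_bridge (trace : List (Int × Int)) (h : ∀ p ∈ trace, p.2 ≠ 0) :
    loopA trace true [] 0 0 = burstOfTraceB trace := by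
  cases trace with
  | nil => simp [loopA, burstOfTraceB]
  | cons p rest =>
    obtain ⟨t, s⟩ := p
    have hs : s ≠ 0 := h (t, s) (by simp)
    have hrest : ∀ q ∈ rest, q.2 ≠ 0 := fun q hq => h q (by simp [hq])
    have hx : pySign s = 1 ∨ pySign s = -1 := pySign_pm s hs
    have h1 : loopA ((t, s) :: rest) true [] 0 0 = loopA rest false [] (pySign s) (pySign s) := by
      simp [loopA]
    have hbr := loopA_runsCont rest [] (pySign s) 1 hrest hx
    rw [show pySign s * 1 = pySign s from by ring] at hbr
    have hfold : List.foldl stepB [(pySign s, 1)] (rest.map (fun p => pySign p.2))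
        = runsCont (pySign s) 1 (rest.map (fun p => pySign p.2)) := by
      have := foldl_stepB_runsCont (rest.map (fun p => pySign p.2)) [] (pySign s) 1
      simpa using this
    have hB : burstOfTraceB ((t, s) :: rest)
        = ((runsCont (pySign s) 1 (rest.map (fun p => pySign p.2))).dropLast).map
            (fun r => r.1 * r.2) := by
      show (((((t, s) :: rest).map (fun p => pySign p.2)).foldl stepB []).dropLast).map
            (fun r => r.1 * r.2) = _
      simp only [List.map_cons, List.foldl_cons]
      rw [show stepB [] (pySign s) = [(pySign s, 1)] from by simp [stepB], hfold]
    rw [h1, hbr, hB]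
    rfl

theorem foldl_app_map {α β : Type} (f : α → β) (l : List α) (acc : List β) :
    l.foldl (fun r t => r ++ [f t]) acc = acc ++ l.map f := by
  induction l generalizing acc with
  | nil => simp
  | cons x xs ih => simp [ih]

-- ===== VERDICT (by name: the statement is the Claim_ definition above) =====
theorem get_burst_spec : Claim_equal_get_burst := by
  intro traces _ hpre
  unfold Spec_get_burst get_burst get_burst_alt
  rw [foldl_app_map (fun trace => loopA trace true [] 0 0) traces []]
  simp only [List.nil_append]
  exact List.map_congr_left (fun tr htr => trace_bridge tr (hpre tr htr))
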